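-- pv_equiv track=rewrite | github.com/cloudify-cosmo/cloudify-system-tests | cosmo_tester/test_suites/auth/saml_responses.py | _generate_attributes
-- ===== SOURCE A (Python) =====
-- OKTA_ATTR_STRING = '<saml2:Attribute Name="{attr_name}" NameFormat="urn:oasis:names:tc:SAML:2.0:attrname-format:unspecified">{attr_value}</saml2:Attribute>'  # noqa
--
-- AZURE_ATTR_STRING = '<Attribute Name="{attr_name}">{attr_value}</Attribute>'
--
-- OKTA_ATTR_VALUE = '<saml2:AttributeValue xmlns:xs="http://www.w3.org/2001/XMLSchema" xmlns:xsi="http://www.w3.org/2001/XMLSchema-instance" xsi:type="xs:string">{value}</saml2:AttributeValue>'  # noqa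
--
-- AZURE_ATTR_VALUE = '<AttributeValue>{value}</AttributeValue>'
--
-- def _generate_attr(attr_name, attr_value, style):
--     if style == 'okta':
--         attr_value = OKTA_ATTR_VALUE.format(value=attr_value)
--         attr_string = OKTA_ATTR_STRING
--     elif style == 'azure':
--         attr_value = AZURE_ATTR_VALUE.format(value=attr_value)
--         attr_string = AZURE_ATTR_STRING
--     else:
--         raise RuntimeError(f'Unknown style {style} for generating attr')
--     return attr_string.format(attr_name=attr_name, attr_value=attr_value)
--
-- def _generate_attributes(username, first_name, last_name, email, groups,
--                          style):
--     if style == 'okta':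
--         attr_value_template = OKTA_ATTR_VALUE
--         attr_string_template = OKTA_ATTR_STRING
--     elif style == 'azure':
--         attr_value_template = AZURE_ATTR_VALUE
--         attr_string_template = AZURE_ATTR_STRING
--     else:
--         raise RuntimeError(f'Unknown style {style} for generating attrs')
--
--     attributes = _generate_attr('username', username, style)
--     if first_name:
--         attributes += _generate_attr('firstname', first_name, style)
--     if last_name:
--         attributes += _generate_attr('lastname', last_name, style)
--     if email:
--         attributes += _generate_attr('email', email, style)
--     if groups:
--         formatted_groups = ''.join(
--             attr_value_template.format(value=group)
--             for group in groups
--         )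
--         attributes += attr_string_template.format(
--             attr_name='groups', attr_value=formatted_groups)
--     return attributes
-- ===== SOURCE B (Python) =====
-- OKTA_ATTR_STRING = '<saml2:Attribute Name="{attr_name}" NameFormat="urn:oasis:names:tc:SAML:2.0:attrname-format:unspecified">{attr_value}</saml2:Attribute>'  # noqa
--
-- AZURE_ATTR_STRING = '<Attribute Name="{attr_name}">{attr_value}</Attribute>'
--
-- OKTA_ATTR_VALUE = '<saml2:AttributeValue xmlns:xs="http://www.w3.org/2001/XMLSchema" xmlns:xsi="http://www.w3.org/2001/XMLSchema-instance" xsi:type="xs:string">{value}</saml2:AttributeValue>'  # noqa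
--
-- AZURE_ATTR_VALUE = '<AttributeValue>{value}</AttributeValue>'
--
-- _TEMPLATES = {
--     'okta': (OKTA_ATTR_STRING, OKTA_ATTR_VALUE),
--     'azure': (AZURE_ATTR_STRING, AZURE_ATTR_VALUE),
-- }
--
--
-- def _generate_attributes(username, first_name, last_name, email, groups,
--                          style):
--     if style not in _TEMPLATES:
--         raise RuntimeError(f'Unknown style {style} for generating attrs')
--     attr_tpl, val_tpl = _TEMPLATES[style]
--
--     fields = [('username', [username])]
--     for name, value in (('firstname', first_name),
--                         ('lastname', last_name),
--                         ('email', email)):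
--         if value:
--             fields.append((name, [value]))
--     if groups:
--         fields.append(('groups', groups))
--
--     return ''.join(
--         attr_tpl.format(
--             attr_name=name,
--             attr_value=''.join(val_tpl.format(value=v) for v in values))
--         for name, values in fields)
-- ===== Notes on version B (the rewrite author's own statement) =====
-- stated objective: alternative
-- what changed: B builds a data-driven list of (name, values) field pairs (username always, optional fields and groups appended when truthy) and renders the whole output in one uniform join over that list, instead of A's template-selecting helper plus five hand-written concatenation branches.
import Mathlib
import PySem

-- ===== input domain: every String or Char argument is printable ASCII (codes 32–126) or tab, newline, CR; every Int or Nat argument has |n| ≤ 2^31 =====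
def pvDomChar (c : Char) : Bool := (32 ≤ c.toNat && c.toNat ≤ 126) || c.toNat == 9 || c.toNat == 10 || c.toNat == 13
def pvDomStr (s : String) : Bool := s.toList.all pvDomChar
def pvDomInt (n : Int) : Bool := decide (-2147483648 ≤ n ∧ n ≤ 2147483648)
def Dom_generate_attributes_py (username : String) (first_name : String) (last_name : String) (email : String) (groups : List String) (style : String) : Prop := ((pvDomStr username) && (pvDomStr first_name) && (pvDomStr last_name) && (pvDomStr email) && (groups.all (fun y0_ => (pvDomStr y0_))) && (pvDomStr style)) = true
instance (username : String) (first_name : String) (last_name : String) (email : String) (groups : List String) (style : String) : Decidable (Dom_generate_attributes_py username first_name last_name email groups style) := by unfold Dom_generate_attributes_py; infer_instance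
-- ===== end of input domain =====

-- B renders a data-driven list of (name, values) field pairs in one uniform join, instead of
-- A's template-selecting helper plus five hand-written concatenation branches; same cost.
-- ===== PORT A =====
-- the .format of each module-level template constant, as string concatenation (exact for these literal templates)
def oktaAttrString (attr_name attr_value : String) : String :=
  "<saml2:Attribute Name=\"" ++ attr_name ++ "\" NameFormat=\"urn:oasis:names:tc:SAML:2.0:attrname-format:unspecified\">" ++ attr_value ++ "</saml2:Attribute>"
def azureAttrString (attr_name attr_value : String) : String :=
  "<Attribute Name=\"" ++ attr_name ++ "\">" ++ attr_value ++ "</Attribute>"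
def oktaAttrValue (value : String) : String :=
  "<saml2:AttributeValue xmlns:xs=\"http://www.w3.org/2001/XMLSchema\" xmlns:xsi=\"http://www.w3.org/2001/XMLSchema-instance\" xsi:type=\"xs:string\">" ++ value ++ "</saml2:AttributeValue>"
def azureAttrValue (value : String) : String :=
  "<AttributeValue>" ++ value ++ "</AttributeValue>"

-- port of _generate_attr; the final `else` branch raises RuntimeError in Python (outside Pre_)
def pyGenerateAttr (attr_name attr_value style : String) : String :=
  if style = "okta" then oktaAttrString attr_name (oktaAttrValue attr_value)
  else if style = "azure" then azureAttrString attr_name (azureAttrValue attr_value)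
  else ""

-- the body of _generate_attributes after the templates have been selected
def pyGenAttrsBody (attr_value_template : String → String)
    (attr_string_template : String → String → String)
    (username first_name last_name email : String) (groups : List String)
    (style : String) : String :=
  let attributes := pyGenerateAttr "username" username style
  let attributes := if first_name ≠ "" then attributes ++ pyGenerateAttr "firstname" first_name style else attributes
  let attributes := if last_name ≠ "" then attributes ++ pyGenerateAttr "lastname" last_name style else attributes
  let attributes := if email ≠ "" then attributes ++ pyGenerateAttr "email" email style else attributes
  let attributes := if groups ≠ [] then
      attributes ++ attr_string_template "groups" (String.join (groups.map (fun g => attr_value_template g)))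
    else attributes
  attributes

def generate_attributes_py (username : String) (first_name : String) (last_name : String) (email : String) (groups : List String) (style : String) : String :=
  if style = "okta" then
    pyGenAttrsBody oktaAttrValue oktaAttrString username first_name last_name email groups style
  else if style = "azure" then
    pyGenAttrsBody azureAttrValue azureAttrString username first_name last_name email groups style
  else "" -- raise RuntimeError (outside Pre_)

-- ===== PORT B =====
-- template lookup (the _TEMPLATES dict); none = RuntimeError (outside Pre_)
def altTemplates (style : String) : Option ((String → String → String) × (String → String)) :=
  if style = "okta" then some (oktaAttrString, oktaAttrValue)
  else if style = "azure" then some (azureAttrString, azureAttrValue)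
  else none

def generate_attributes_py_alt (username : String) (first_name : String) (last_name : String) (email : String) (groups : List String) (style : String) : String :=
  match altTemplates style with
  | none => "" -- raise RuntimeError (outside Pre_)
  | some (attr_tpl, val_tpl) =>
    let fields :=
      [("username", [username])] ++
      (List.foldl
        (fun acc (p : String × String) => if p.2 ≠ "" then acc ++ [(p.1, [p.2])] else acc)
        [] [("firstname", first_name), ("lastname", last_name), ("email", email)]) ++
      (if groups ≠ [] then [("groups", groups)] else [])
    String.join (fields.map (fun p =>
      attr_tpl p.1 (String.join (p.2.map (fun v => val_tpl v)))))

-- ===== PRECONDITION & SPEC =====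
-- Pre_ excludes exactly the styles on which A raises RuntimeError ('Unknown style … for generating attrs')
def Pre_generate_attributes_py (username : String) (first_name : String) (last_name : String) (email : String) (groups : List String) (style : String) : Prop :=
  style = "okta" ∨ style = "azure"
instance (username : String) (first_name : String) (last_name : String) (email : String) (groups : List String) (style : String) : Decidable (Pre_generate_attributes_py username first_name last_name email groups style) := by unfold Pre_generate_attributes_py; infer_instance

def pvWitness_generate_attributes_py : String × String × String × String × List String × String :=
  ("admin", "Ada", "", "ada@x.io", ["devs", "ops"], "okta")

def Spec_generate_attributes_py (username : String) (first_name : String) (last_name : String) (email : String) (groups : List String) (style : String) (out : String) : Prop := out = generate_attributes_py_alt username first_name last_name email groups style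
instance (username : String) (first_name : String) (last_name : String) (email : String) (groups : List String) (style : String) (out : String) : Decidable (Spec_generate_attributes_py username first_name last_name email groups style out) := by unfold Spec_generate_attributes_py; infer_instance

-- ===== CLAIM (what is proved, stated in full; the proofs are below) =====
def Claim_equal_generate_attributes_py : Prop := ∀ (username : String) (first_name : String) (last_name : String) (email : String) (groups : List String) (style : String), Dom_generate_attributes_py username first_name last_name email groups style → Pre_generate_attributes_py username first_name last_name email groups style → Spec_generate_attributes_py username first_name last_name email groups style (generate_attributes_py username first_name last_name email groups style)

-- ===== LEMMAS AND PROOFS =====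
-- both sides with the templates abstracted agree
set_option maxHeartbeats 1600000 in
theorem body_eq (vt : String → String) (st : String → String → String)
    (username first_name last_name email : String) (groups : List String)
    (style : String) (hst : pyGenerateAttr "username" username style = st "username" (vt username))
    (hfn : pyGenerateAttr "firstname" first_name style = st "firstname" (vt first_name))
    (hln : pyGenerateAttr "lastname" last_name style = st "lastname" (vt last_name))
    (hem : pyGenerateAttr "email" email style = st "email" (vt email)) :
    pyGenAttrsBody vt st username first_name last_name email groups style =
      String.join
        (([("username", [username])] ++
          (List.foldl
            (fun acc (p : String × String) => if p.2 ≠ "" then acc ++ [(p.1, [p.2])] else acc)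
            [] [("firstname", first_name), ("lastname", last_name), ("email", email)]) ++
          (if groups ≠ [] then [("groups", groups)] else [])).map (fun p =>
            st p.1 (String.join (p.2.map (fun v => vt v))))) := by
  unfold pyGenAttrsBody
  by_cases h1 : first_name = "" <;> by_cases h2 : last_name = "" <;>
    by_cases h3 : email = "" <;> by_cases h4 : groups = [] <;>
      simp [h1, h2, h3, h4, hst, hfn, hln, hem, String.join, String.append_assoc]

-- cheap definitional reductions of both ports at each concrete style
theorem a_okta (u f l e : String) (g : List String) :
    generate_attributes_py u f l e g "okta" =
      pyGenAttrsBody oktaAttrValue oktaAttrString u f l e g "okta" := rfl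
theorem a_azure (u f l e : String) (g : List String) :
    generate_attributes_py u f l e g "azure" =
      pyGenAttrsBody azureAttrValue azureAttrString u f l e g "azure" := rfl

theorem alt_reduce (st : String → String → String) (vt : String → String)
    (u f l e : String) (g : List String) (style : String)
    (h : altTemplates style = some (st, vt)) :
    generate_attributes_py_alt u f l e g style =
      String.join
        (([("username", [u])] ++
          (List.foldl
            (fun acc (p : String × String) => if p.2 ≠ "" then acc ++ [(p.1, [p.2])] else acc)
            [] [("firstname", f), ("lastname", l), ("email", e)]) ++
          (if g ≠ [] then [("groups", g)] else [])).map (fun p =>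
            st p.1 (String.join (p.2.map (fun v => vt v))))) := by
  unfold generate_attributes_py_alt
  rw [h]

theorem generate_attributes_py_spec : Claim_equal_generate_attributes_py := by
  intro username first_name last_name email groups style _ hpre
  unfold Spec_generate_attributes_py
  rcases hpre with h | h <;> subst h
  · rw [a_okta, alt_reduce oktaAttrString oktaAttrValue _ _ _ _ _ _ rfl]
    exact body_eq _ _ _ _ _ _ _ _ rfl rfl rfl rfl
  · rw [a_azure, alt_reduce azureAttrString azureAttrValue _ _ _ _ _ _ rfl]
    exact body_eq _ _ _ _ _ _ _ _ rfl rfl rfl rfl
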